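-- pv_equiv track=rewrite | github.com/FG-SirVY/AdventOfCode2019 | day10_task1.py | get_all_direction_options
-- ===== SOURCE A (Python) =====
-- def is_linear_combination(p1, p2):
--     return p1[0] * p2[1] == p2[0] * p1[1]
--
-- def get_all_direction_options(max_len):
--     direction_options = [(1, 1), (1, -1), (-1, -1), (-1, 1)]
--     permutations = []
--     for x in range(1, max_len):
--         for y in range(0, x):
--             pair = (x, y)
--
--             is_already_there = False
--             for e in direction_options:
--                 if is_linear_combination(e, pair):
--                     is_already_there = True
--                     break
--
--             if not is_already_there:
--                 direction_options.append(pair)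
--                 if y != 0:
--                     permutations.append((x, -y))
--                     permutations.append((-y, x))
--                     permutations.append((-y, -x))
--                     permutations.append((-x, -y))
--
--                 permutations.append((-x, y))
--                 permutations.append((y, x))
--                 permutations.append((y, -x))
--
--     direction_options.extend(permutations)
--     return direction_options
-- ===== SOURCE B (Python) =====
-- def _gcd(a, b):
--     while b:
--         a, b = b, a % b
--     return a
--
-- def get_all_direction_options(max_len):
--     seeds = [(1, 1), (1, -1), (-1, -1), (-1, 1)]
--     primitives = [(x, y) for x in range(1, max_len) for y in range(0, x) if _gcd(x, y) == 1]
--     permutations = []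
--     for (x, y) in primitives:
--         if y != 0:
--             permutations.extend([(x, -y), (-y, x), (-y, -x), (-x, -y)])
--         permutations.extend([(-x, y), (y, x), (y, -x)])
--     return seeds + primitives + permutations
-- ===== Notes on version B (the rewrite author's own statement) =====
-- stated objective: alternative
-- what changed: Replaces A's single interleaved loop (which tests each octant pair for collinearity against the ever-growing direction list) by a build-table-then-transform decomposition: first a comprehension keeps exactly the coprime (gcd==1) octant pairs, then a separate pass emits each kept pair's symmetry images; the quadratic inner collinearity scan disappears.
import Mathlib
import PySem

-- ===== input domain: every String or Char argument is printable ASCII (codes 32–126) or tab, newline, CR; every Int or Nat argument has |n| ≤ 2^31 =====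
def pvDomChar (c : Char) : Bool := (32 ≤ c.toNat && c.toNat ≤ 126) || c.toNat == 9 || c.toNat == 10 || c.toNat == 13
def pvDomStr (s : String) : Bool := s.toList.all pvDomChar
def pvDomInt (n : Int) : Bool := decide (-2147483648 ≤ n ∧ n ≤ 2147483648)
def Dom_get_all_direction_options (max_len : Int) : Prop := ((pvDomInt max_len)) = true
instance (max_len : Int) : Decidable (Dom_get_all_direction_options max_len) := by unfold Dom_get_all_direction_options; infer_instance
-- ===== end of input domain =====

-- B replaces A's interleaved collinearity-scan loop by a gcd-filtered table of
-- primitive octant pairs followed by a separate symmetry-image pass (alternative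
-- decomposition; asymptotically fewer operations).


-- ===== PORT A =====
def is_linear_combination (p1 p2 : Int × Int) : Bool :=
  p1.1 * p2.2 == p2.1 * p1.2

-- the body of A's inner 'for y' loop (state = (direction_options, permutations));
-- the for-e-with-break scan computing the flag is ported as List.any
def innerStepA (x : Int) (st : List (Int × Int) × List (Int × Int)) (y : Int) :
    List (Int × Int) × List (Int × Int) :=
  let pair := (x, y)
  let is_already_there := st.1.any (fun e => is_linear_combination e pair)
  if is_already_there then st
  else (st.1 ++ [pair],
        (if y ≠ 0 then st.2 ++ [(x, -y), (-y, x), (-y, -x), (-x, -y)] else st.2)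
          ++ [(-x, y), (y, x), (y, -x)])

def outerStepA (st : List (Int × Int) × List (Int × Int)) (x : Int) :
    List (Int × Int) × List (Int × Int) :=
  (PySem.List.pyRange 0 x 1).foldl (innerStepA x) st

def get_all_direction_options (max_len : Int) : List (Int × Int) :=
  let st := (PySem.List.pyRange 1 max_len 1).foldl outerStepA
    ([(1, 1), (1, -1), (-1, -1), (-1, 1)], [])
  st.1 ++ st.2

-- ===== PORT B =====
-- Source B's hand-written Euclid (Python's '%' is PySem.Int.mod)
def pygcd (a b : Int) : Int :=
  if h : b = 0 then a else pygcd b (PySem.Int.mod a b)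
termination_by b.natAbs
decreasing_by
  have h1 := PySem.Int.mod_nonneg a (b := b)
  have h2 := PySem.Int.mod_lt a (b := b)
  have h3 := PySem.Int.mod_neg_bounds a (b := b)
  rcases lt_trichotomy b 0 with hb | hb | hb
  · have := h3 hb; omega
  · exact absurd hb h
  · have := h1 hb; have := h2 hb; omega

def get_all_direction_options_alt (max_len : Int) : List (Int × Int) :=
  let seeds : List (Int × Int) := [(1, 1), (1, -1), (-1, -1), (-1, 1)]
  let primitives := (PySem.List.pyRange 1 max_len 1).flatMap (fun x =>
    ((PySem.List.pyRange 0 x 1).filter (fun y => pygcd x y == 1)).map (fun y => (x, y)))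
  let permutations := primitives.foldl (fun p xy =>
    (if xy.2 ≠ 0 then
        p ++ [(xy.1, -xy.2), (-xy.2, xy.1), (-xy.2, -xy.1), (-xy.1, -xy.2)]
      else p) ++ [(-xy.1, xy.2), (xy.2, xy.1), (xy.2, -xy.1)]) []
  seeds ++ primitives ++ permutations

-- ===== PRECONDITION & SPEC =====
def Spec_get_all_direction_options (max_len : Int) (out : List (Int × Int)) : Prop := out = get_all_direction_options_alt max_len
instance (max_len : Int) (out : List (Int × Int)) : Decidable (Spec_get_all_direction_options max_len out) := by unfold Spec_get_all_direction_options; infer_instance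

-- ===== CLAIM (what is proved, stated in full; the proofs are below) =====
def Claim_equal_get_all_direction_options : Prop := ∀ (max_len : Int), Dom_get_all_direction_options max_len → Spec_get_all_direction_options max_len (get_all_direction_options max_len)

-- ===== LEMMAS AND PROOFS =====

-- pygcd computes Int.gcd on nonnegative arguments
theorem pygcd_eq_gcd (a b : Int) (ha : 0 ≤ a) (hb : 0 ≤ b) :
    pygcd a b = (Int.gcd a b : Int) := by
  have H : ∀ (n : Nat) (a b : Int), 0 ≤ a → 0 ≤ b → b.natAbs = n →
      pygcd a b = (Int.gcd a b : Int) := by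
    intro n
    induction n using Nat.strong_induction_on with
    | _ n ih =>
      intro a b ha hb hn
      rw [pygcd]
      split_ifs with h
      · subst h
        rw [Int.gcd_zero_right]
        exact (Int.natAbs_of_nonneg ha).symm
      · have hbpos : 0 < b := lt_of_le_of_ne hb (Ne.symm h)
        have hmn : 0 ≤ a % b := Int.emod_nonneg a (ne_of_gt hbpos)
        have hml : a % b < b := Int.emod_lt_of_pos a hbpos
        rw [PySem.Int.mod_eq_emod_of_pos hbpos]
        rw [ih (a % b).natAbs (by omega) b (a % b) hb hmn rfl]
        have : Int.gcd b (a % b) = Int.gcd a b := by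
          rw [Int.gcd_comm, Int.gcd_emod]
        rw [this]
  exact H b.natAbs a b ha hb rfl

def seedsL : List (Int × Int) := [(1, 1), (1, -1), (-1, -1), (-1, 1)]

def img (x y : Int) : List (Int × Int) :=
  (if y ≠ 0 then [(x, -y), (-y, x), (-y, -x), (-x, -y)] else [])
    ++ [(-x, y), (y, x), (y, -x)]

-- the primitive pairs of rows 1..x-1
def primsTo (x : Int) : List (Int × Int) :=
  (PySem.List.pyRange 1 x 1).flatMap (fun a =>
    ((PySem.List.pyRange 0 a 1).filter (fun b => pygcd a b == 1)).map (fun b => (a, b)))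

-- the primitive pairs (x, b) with b < y
def primsRow (x y : Int) : List (Int × Int) :=
  ((PySem.List.pyRange 0 y 1).filter (fun b => pygcd x b == 1)).map (fun b => (x, b))

-- membership characterisation of the accumulated primitive list
theorem mem_prims (x y a b : Int) (hx : 1 ≤ x) (_hy : 0 ≤ y) (hyx : y ≤ x) :
    (a, b) ∈ primsTo x ++ primsRow x y ↔
      (1 ≤ a ∧ 0 ≤ b ∧ b < a ∧ Int.gcd a b = 1 ∧ (a < x ∨ (a = x ∧ b < y))) := by
  simp only [primsTo, primsRow, List.mem_append, List.mem_flatMap, List.mem_map,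
    List.mem_filter, PySem.List.mem_pyRange_one]
  constructor
  · rintro (⟨a', ⟨ha1, ha2⟩, b', ⟨⟨hb1, hb2⟩, hg⟩, heq⟩ | ⟨b', ⟨⟨hb1, hb2⟩, hg⟩, heq⟩)
    · obtain ⟨rfl, rfl⟩ := Prod.mk.injEq .. ▸ heq
      rw [pygcd_eq_gcd a' b' (by omega) hb1, beq_iff_eq] at hg
      refine ⟨by omega, hb1, hb2, by exact_mod_cast hg, Or.inl ha2⟩
    · obtain ⟨rfl, rfl⟩ := Prod.mk.injEq .. ▸ heq
      rw [pygcd_eq_gcd x b' (by omega) hb1, beq_iff_eq] at hg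
      refine ⟨hx, hb1, by omega, by exact_mod_cast hg, Or.inr ⟨rfl, hb2⟩⟩
  · rintro ⟨ha1, hb1, hba, hg, hlt | ⟨rfl, hby⟩⟩
    · refine Or.inl ⟨a, ⟨ha1, hlt⟩, b, ⟨⟨hb1, hba⟩, ?_⟩, rfl⟩
      rw [pygcd_eq_gcd a b (by omega) hb1, beq_iff_eq]; exact_mod_cast hg
    · refine Or.inr ⟨b, ⟨⟨hb1, hby⟩, ?_⟩, rfl⟩
      rw [pygcd_eq_gcd a b (by omega) hb1, beq_iff_eq]; exact_mod_cast hg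

-- the collinearity scan at (x, y) succeeds iff gcd x y ≠ 1
theorem scan_iff (x y : Int) (hx : 1 ≤ x) (hy : 0 ≤ y) (hyx : y < x) :
    ((seedsL ++ (primsTo x ++ primsRow x y)).any
        (fun e => is_linear_combination e (x, y)) = true) ↔ Int.gcd x y ≠ 1 := by
  have hseeds : seedsL.any (fun e => is_linear_combination e (x, y)) = false := by
    simp only [seedsL, is_linear_combination, List.any_cons, List.any_nil]
    simp only [Bool.or_false, Bool.or_eq_false_iff, beq_eq_false_iff_ne, ne_eq]
    refine ⟨by omega, by omega, by omega, by omega⟩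
  rw [List.any_append, hseeds, Bool.false_or, List.any_eq_true]
  constructor
  · rintro ⟨⟨a, b⟩, hmem, hcol⟩ hco
    obtain ⟨ha1, hb1, hba, hg, hpos⟩ := (mem_prims x y a b hx hy (by omega)).mp hmem
    simp only [is_linear_combination, beq_iff_eq] at hcol
    have hcop : IsCoprime x y := Int.isCoprime_iff_gcd_eq_one.mpr hco
    have hdvd : x ∣ a * y := ⟨b, hcol⟩
    have hxa : x ∣ a := hcop.dvd_of_dvd_mul_right hdvd
    rcases hpos with hlt | ⟨rfl, hby⟩
    · have : x ≤ a := Int.le_of_dvd (by omega) hxa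
      omega
    · have : y = b := by
        have hx0 : (a : Int) ≠ 0 := by omega
        exact mul_left_cancel₀ hx0 hcol
      omega
  · intro hco
    by_cases hy0 : y = 0
    · subst hy0
      have hx2 : 2 ≤ x := by
        rcases lt_or_ge x 2 with h | h
        · exfalso; apply hco
          have : x = 1 := by omega
          subst this; rfl
        · exact h
      refine ⟨(1, 0), ?_, ?_⟩
      · exact (mem_prims x 0 1 0 hx le_rfl (by omega)).mpr
          ⟨le_rfl, le_rfl, by omega, by rfl, Or.inl (by omega)⟩
      · simp [is_linear_combination]
    · -- y > 0; the reduced pair (x/g, y/g) is an earlier primitive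
      have hypos : 0 < y := by omega
      have hgpos : 0 < Int.gcd x y := Int.gcd_pos_of_ne_zero_left y (by omega)
      have hg2 : 2 ≤ (Int.gcd x y : Int) := by
        have h1 : Int.gcd x y ≠ 1 := hco
        have h2 : 1 ≤ Int.gcd x y := hgpos
        omega
      have hdiv := Int.gcd_div_gcd_div_gcd hgpos
      set g : Int := (Int.gcd x y : Int) with hgdef
      have hgne : g ≠ 0 := by omega
      obtain ⟨a, hxa⟩ : g ∣ x := Int.gcd_dvd_left x y
      obtain ⟨b, hyb⟩ : g ∣ y := Int.gcd_dvd_right x y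
      have hga : x / g = a := by
        rw [hxa, Int.mul_ediv_cancel_left a hgne]
      have hgb : y / g = b := by
        rw [hyb, Int.mul_ediv_cancel_left b hgne]
      have ha1 : 1 ≤ a := by nlinarith
      have hb0 : 0 ≤ b := by nlinarith
      have hba : b < a := by nlinarith
      have hax : a < x := by nlinarith
      have hgcd1 : Int.gcd a b = 1 := by rwa [hga, hgb] at hdiv
      refine ⟨(a, b), ?_, ?_⟩
      · exact (mem_prims x y a b hx hy (by omega)).mpr
          ⟨ha1, hb0, hba, hgcd1, Or.inl hax⟩
      · simp only [is_linear_combination, beq_iff_eq]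
        rw [hxa, hyb]; ring

-- one inner step advances primsRow by one
theorem innerStepA_eq (x y : Int) (hx : 1 ≤ x) (hy : 0 ≤ y) (hyx : y < x) :
    innerStepA x (seedsL ++ (primsTo x ++ primsRow x y),
        (primsTo x ++ primsRow x y).flatMap (fun p => img p.1 p.2)) y
      = (seedsL ++ (primsTo x ++ primsRow x (y + 1)),
        (primsTo x ++ primsRow x (y + 1)).flatMap (fun p => img p.1 p.2)) := by
  have hrow : primsRow x (y + 1)
      = primsRow x y ++ (if pygcd x y == 1 then [(x, y)] else []) := by
    by_cases hb : (pygcd x y == 1) = true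
    · simp [primsRow, PySem.List.pyRange_one_succ_right hy, List.filter_append, hb]
    · simp [primsRow, PySem.List.pyRange_one_succ_right hy, List.filter_append, hb]
  by_cases hg : Int.gcd x y = 1
  · have hscan : ((seedsL ++ (primsTo x ++ primsRow x y)).any
        (fun e => is_linear_combination e (x, y))) = false := by
      rw [Bool.eq_false_iff]
      intro hc
      exact (scan_iff x y hx hy hyx).mp hc hg
    have hgb : (pygcd x y == 1) = true := by
      rw [pygcd_eq_gcd x y (by omega) hy, beq_iff_eq]; exact_mod_cast hg
    simp only [innerStepA, hscan, if_false, hrow, hgb, if_true, Bool.false_eq_true]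
    simp only [Prod.mk.injEq]
    constructor
    · simp [List.append_assoc]
    · simp only [List.flatMap_append, List.flatMap_cons, List.flatMap_nil,
        List.append_nil, img]
      by_cases hy0 : y ≠ 0 <;> simp [hy0, List.append_assoc]
  · have hscan : ((seedsL ++ (primsTo x ++ primsRow x y)).any
        (fun e => is_linear_combination e (x, y))) = true :=
      (scan_iff x y hx hy hyx).mpr hg
    have hgb : (pygcd x y == 1) = false := by
      rw [pygcd_eq_gcd x y (by omega) hy]
      simp only [beq_eq_false_iff_ne, ne_eq]
      intro hc
      exact hg (by exact_mod_cast hc)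
    simp [innerStepA, hscan, hrow, hgb]

theorem inner_inv (x : Int) (hx : 1 ≤ x) : ∀ (y : Int), 0 ≤ y → y ≤ x →
    (PySem.List.pyRange y x 1).foldl (innerStepA x)
      (seedsL ++ (primsTo x ++ primsRow x y),
       (primsTo x ++ primsRow x y).flatMap (fun p => img p.1 p.2))
    = (seedsL ++ (primsTo x ++ primsRow x x),
       (primsTo x ++ primsRow x x).flatMap (fun p => img p.1 p.2)) := by
  have H : ∀ (n : Nat) (y : Int), 0 ≤ y → y ≤ x → (x - y).toNat = n →
      (PySem.List.pyRange y x 1).foldl (innerStepA x)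
        (seedsL ++ (primsTo x ++ primsRow x y),
         (primsTo x ++ primsRow x y).flatMap (fun p => img p.1 p.2))
      = (seedsL ++ (primsTo x ++ primsRow x x),
         (primsTo x ++ primsRow x x).flatMap (fun p => img p.1 p.2)) := by
    intro n
    induction n with
    | zero =>
      intro y hy hyx hn
      have : y = x := by omega
      subst this
      rw [PySem.List.pyRange_one_eq_nil le_rfl]
      rfl
    | succ n ih =>
      intro y hy hyx hn
      have hlt : y < x := by omega
      rw [PySem.List.pyRange_one_cons hlt, List.foldl_cons,
        innerStepA_eq x y hx hy hlt]
      exact ih (y + 1) (by omega) (by omega) (by omega)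
  intro y hy hyx
  exact H (x - y).toNat y hy hyx rfl

theorem primsTo_succ (x : Int) (hx : 1 ≤ x) :
    primsTo (x + 1) = primsTo x ++ primsRow x x := by
  simp only [primsTo, primsRow, PySem.List.pyRange_one_succ_right hx,
    List.flatMap_append, List.flatMap_cons, List.flatMap_nil, List.append_nil]

theorem outer_inv (m : Int) : ∀ (x : Int), 1 ≤ x → x ≤ m →
    (PySem.List.pyRange x m 1).foldl outerStepA
      (seedsL ++ primsTo x, (primsTo x).flatMap (fun p => img p.1 p.2))
    = (seedsL ++ primsTo m, (primsTo m).flatMap (fun p => img p.1 p.2)) := by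
  have H : ∀ (n : Nat) (x : Int), 1 ≤ x → x ≤ m → (m - x).toNat = n →
      (PySem.List.pyRange x m 1).foldl outerStepA
        (seedsL ++ primsTo x, (primsTo x).flatMap (fun p => img p.1 p.2))
      = (seedsL ++ primsTo m, (primsTo m).flatMap (fun p => img p.1 p.2)) := by
    intro n
    induction n with
    | zero =>
      intro x hx hxm hn
      have : x = m := by omega
      subst this
      rw [PySem.List.pyRange_one_eq_nil le_rfl]
      rfl
    | succ n ih =>
      intro x hx hxm hn
      have hlt : x < m := by omega
      rw [PySem.List.pyRange_one_cons hlt, List.foldl_cons]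
      have hrow0 : primsRow x 0 = [] := by
        simp [primsRow, PySem.List.pyRange_one_eq_nil le_rfl]
      have hstep : outerStepA
          (seedsL ++ primsTo x, (primsTo x).flatMap (fun p => img p.1 p.2)) x
          = (seedsL ++ primsTo (x + 1),
             (primsTo (x + 1)).flatMap (fun p => img p.1 p.2)) := by
        have := inner_inv x hx 0 le_rfl (by omega)
        rw [hrow0, List.append_nil] at this
        rw [outerStepA, this, primsTo_succ x hx]
      rw [hstep]
      exact ih (x + 1) (by omega) (by omega) (by omega)
  intro x hx hxm
  exact H (m - x).toNat x hx hxm rfl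

theorem foldl_img (P : List (Int × Int)) (acc : List (Int × Int)) :
    P.foldl (fun p xy =>
      (if xy.2 ≠ 0 then
          p ++ [(xy.1, -xy.2), (-xy.2, xy.1), (-xy.2, -xy.1), (-xy.1, -xy.2)]
        else p) ++ [(-xy.1, xy.2), (xy.2, xy.1), (xy.2, -xy.1)]) acc
    = acc ++ P.flatMap (fun p => img p.1 p.2) := by
  induction P generalizing acc with
  | nil => simp
  | cons hd tl ih =>
    rw [List.foldl_cons, ih, List.flatMap_cons]
    by_cases h : hd.2 ≠ 0 <;> simp [h, img, List.append_assoc]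

theorem foldA_eq (m : Int) :
    (PySem.List.pyRange 1 m 1).foldl outerStepA
      (([(1, 1), (1, -1), (-1, -1), (-1, 1)] : List (Int × Int)), [])
    = (seedsL ++ primsTo m, (primsTo m).flatMap (fun p => img p.1 p.2)) := by
  by_cases hm : m ≤ 1
  · have hp : primsTo m = [] := by
      simp [primsTo, PySem.List.pyRange_one_eq_nil hm]
    rw [PySem.List.pyRange_one_eq_nil hm, hp]
    simp [seedsL]
  · have h := outer_inv m 1 le_rfl (by omega)
    have hp1 : primsTo 1 = [] := by
      simp [primsTo, PySem.List.pyRange_one_eq_nil le_rfl]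
    rw [hp1] at h
    simpa [seedsL] using h

-- ===== VERDICT (by name: the statement is the Claim_ definition above) =====
theorem get_all_direction_options_spec : Claim_equal_get_all_direction_options := by
  intro m _
  show get_all_direction_options m = get_all_direction_options_alt m
  unfold get_all_direction_options get_all_direction_options_alt
  dsimp only
  rw [foldl_img, foldA_eq]
  show (seedsL ++ primsTo m) ++ (primsTo m).flatMap (fun p => img p.1 p.2)
    = [(1, 1), (1, -1), (-1, -1), (-1, 1)] ++ primsTo m
      ++ ([] ++ (primsTo m).flatMap (fun p => img p.1 p.2))
  simp [seedsL]
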